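-- pv_equiv track=rewrite | github.com/mbanon/binonymizer | binonymizer/util.py | extractUppercased
-- ===== SOURCE A (Python) =====
-- def extractUppercased(sentence):
--   words = sentence.split()  #Naive tokenizing
--   nonefound =True
--   extracted = []
--   pending = []
--
--   for word in words:
--     if word[0].isupper():
--       nonefound = False
--       extracted.extend(pending)
--       pending = []
--       extracted.append(word)
--     else:
--       if nonefound:
--         continue
--       else:
--         pending.append(word)
--
--
--   return " ".join(extracted)
-- ===== SOURCE B (Python) =====
-- def upIndices(words):
--     return [i for i, w in enumerate(words) if w[0].isupper()]
--
-- def extractUppercased(sentence):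
--     words = sentence.split()
--     ups = upIndices(words)
--     if not ups:
--         return ""
--     return " ".join(words[ups[0]:ups[-1] + 1])
-- ===== Notes on version B (the rewrite author's own statement) =====
-- stated objective: simpler
-- what changed: Replaces A's pending-buffer state machine (nonefound flag, extracted and pending lists mutated per word) with a boundary-finding step: collect the indices of words whose first character is uppercase and join the slice from the first to the last such index.
import Mathlib
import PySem

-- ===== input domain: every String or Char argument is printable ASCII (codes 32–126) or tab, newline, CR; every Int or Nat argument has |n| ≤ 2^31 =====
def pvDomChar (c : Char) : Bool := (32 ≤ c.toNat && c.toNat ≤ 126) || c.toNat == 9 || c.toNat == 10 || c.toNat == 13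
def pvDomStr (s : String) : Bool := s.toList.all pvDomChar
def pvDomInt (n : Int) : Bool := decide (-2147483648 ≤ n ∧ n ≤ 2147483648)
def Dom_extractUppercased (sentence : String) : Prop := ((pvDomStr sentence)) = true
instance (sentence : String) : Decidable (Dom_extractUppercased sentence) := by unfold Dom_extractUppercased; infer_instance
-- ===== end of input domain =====

-- B replaces A's pending-buffer state machine by finding the first and last word whose
-- first character is uppercase and joining that slice (objective: simpler).

-- ===== PORT A =====
-- word[0].isupper(); words produced by split() are nonempty, so the headD default is never consulted
def pvHeadUp (w : String) : Bool := PySem.Chars.isupper (w.toList.headD ' ')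

-- the body of A's for-loop: state = (nonefound, extracted, pending)
def pvStepA (st : Bool × List String × List String) (word : String) :
    Bool × List String × List String :=
  if pvHeadUp word then (false, st.2.1 ++ st.2.2 ++ [word], [])
  else if st.1 then st else (st.1, st.2.1, st.2.2 ++ [word])

def extractUppercased (sentence : String) : String :=
  let words := PySem.Str.split₀ sentence
  let st := words.foldl pvStepA (true, [], [])
  PySem.Str.join " " st.2.1

-- ===== PORT B =====
-- B's helper upIndices: [i for i, w in enumerate(words) if w[0].isupper()]
def pvUpIndices (words : List String) : List Int :=
  (PySem.List.enumerate words).filterMap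
    (fun iw => if pvHeadUp iw.2 then some iw.1 else none)

def extractUppercased_alt (sentence : String) : String :=
  let words := PySem.Str.split₀ sentence
  let ups := pvUpIndices words
  match ups with
  | [] => ""
  | i :: rest =>
      PySem.Str.join " "
        (PySem.List.slice words (some i) (some ((i :: rest).getLast (by simp) + 1)))

-- ===== PRECONDITION & SPEC =====
def Spec_extractUppercased (sentence : String) (out : String) : Prop := out = extractUppercased_alt sentence
instance (sentence : String) (out : String) : Decidable (Spec_extractUppercased sentence out) := by unfold Spec_extractUppercased; infer_instance

-- ===== CLAIM (what is proved, stated in full; the proofs are below) =====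
def Claim_equal_extractUppercased : Prop := ∀ (sentence : String), Dom_extractUppercased sentence → Spec_extractUppercased sentence (extractUppercased sentence)

-- ===== LEMMAS AND PROOFS =====

-- words with leading non-uppercase words removed
def pvLtrim (ws : List String) : List String := ws.dropWhile (fun w => !pvHeadUp w)

-- words with trailing non-uppercase words removed
def pvRtrim (ws : List String) : List String :=
  (ws.reverse.dropWhile (fun w => !pvHeadUp w)).reverse

-- uppercase-initial indices with an arbitrary enumeration start, for the inductions
def pvUps (ws : List String) (s : Int) : List Int :=
  (PySem.List.enumerate ws s).filterMap
    (fun iw => if pvHeadUp iw.2 then some iw.1 else none)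

-- last element with default 0
def pvLastD (l : List Int) : Int := l.getLast?.getD 0

theorem pvUps_cons (w : String) (ws : List String) (s : Int) :
    pvUps (w :: ws) s = if pvHeadUp w then s :: pvUps ws (s + 1) else pvUps ws (s + 1) := by
  simp [pvUps, PySem.List.enumerate, List.filterMap]
  split_ifs <;> simp

theorem pvUps_shift (ws : List String) (s : Int) :
    pvUps ws s = (pvUps ws 0).map (s + ·) := by
  induction ws generalizing s with
  | nil => simp [pvUps, PySem.List.enumerate]
  | cons w ws ih =>
    rw [pvUps_cons, pvUps_cons, ih (s+1), ih (0+1)]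
    split_ifs <;> simp [List.map_map]

theorem pvUps_nil_iff (ws : List String) (s : Int) :
    pvUps ws s = [] ↔ ws.any pvHeadUp = false := by
  induction ws generalizing s with
  | nil => simp [pvUps, PySem.List.enumerate]
  | cons w ws ih =>
    rw [pvUps_cons]
    split_ifs with h <;> simp [h, ih]

theorem pvUps_nonneg (ws : List String) (s : Int) :
    ∀ x ∈ pvUps ws s, s ≤ x := by
  induction ws generalizing s with
  | nil => simp [pvUps, PySem.List.enumerate]
  | cons w ws ih =>
    rw [pvUps_cons]
    intro x hx
    by_cases h : pvHeadUp w = true <;> simp [h] at hx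
    · rcases hx with hx | hx
      · omega
      · have := ih (s+1) x hx; omega
    · have := ih (s+1) x hx; omega

theorem pvRtrim_cons (w : String) (ws : List String) :
    pvRtrim (w :: ws) =
      if ws.any pvHeadUp then w :: pvRtrim ws else (if pvHeadUp w then [w] else []) := by
  unfold pvRtrim
  rw [List.reverse_cons, List.dropWhile_append]
  by_cases h : ws.any pvHeadUp
  · have hne : ws.reverse.dropWhile (fun w => !pvHeadUp w) ≠ [] := by
      intro hnil
      rw [List.dropWhile_eq_nil_iff] at hnil
      rcases List.any_eq_true.mp h with ⟨x, hx, hpx⟩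
      have := hnil x (List.mem_reverse.mpr hx)
      simp [hpx] at this
    simp [h, List.isEmpty_iff, hne]
  · have hnil : ws.reverse.dropWhile (fun w => !pvHeadUp w) = [] := by
      rw [List.dropWhile_eq_nil_iff]
      intro x hx
      have hf : pvHeadUp x = false := by
        by_contra hc
        simp only [Bool.not_eq_false] at hc
        exact absurd (List.any_eq_true.mpr ⟨x, List.mem_reverse.mp hx, hc⟩) h
      simp [hf]
    simp [h, hnil, List.dropWhile]
    split_ifs <;> simp_all

theorem pvFoldF (ws : List String) (E P : List String) :
    (ws.foldl pvStepA (false, E, P)).2.1 =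
      E ++ (if ws.any pvHeadUp then P ++ pvRtrim ws else []) := by
  induction ws generalizing E P with
  | nil => simp
  | cons w ws ih =>
    by_cases h : pvHeadUp w = true
    · simp only [List.foldl_cons, pvStepA, h, if_true]
      rw [ih, pvRtrim_cons]
      by_cases h2 : ws.any pvHeadUp = true <;> simp [h, h2]
    · simp only [List.foldl_cons, pvStepA, h, if_false, Bool.false_eq_true]
      rw [ih, pvRtrim_cons]
      by_cases h2 : ws.any pvHeadUp = true <;> simp [h, h2]

theorem pvFoldA (ws : List String) :
    (ws.foldl pvStepA (true, [], [])).2.1 = pvRtrim (pvLtrim ws) := by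
  induction ws with
  | nil => simp [pvLtrim, pvRtrim]
  | cons w ws ih =>
    by_cases h : pvHeadUp w = true
    · simp only [List.foldl_cons, pvStepA, h, if_true]
      rw [pvFoldF]
      have : pvLtrim (w :: ws) = w :: ws := by simp [pvLtrim, List.dropWhile, h]
      rw [this, pvRtrim_cons]
      by_cases h2 : ws.any pvHeadUp = true <;> simp [h, h2]
    · simp only [List.foldl_cons, pvStepA, h, if_false, Bool.false_eq_true, if_true]
      rw [ih]
      have : pvLtrim (w :: ws) = pvLtrim ws := by simp [pvLtrim, List.dropWhile, h]
      simp [this]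

theorem pvLastD_mem (i : Int) (r : List Int) : pvLastD (i :: r) ∈ i :: r := by
  unfold pvLastD
  rw [List.getLast?_eq_some_getLast (l := i :: r) (by simp)]
  exact List.getLast_mem _

theorem pvLastD_cons_cons (i j : Int) (r : List Int) :
    pvLastD (i :: j :: r) = pvLastD (j :: r) := by
  simp [pvLastD]

theorem pvLastD_map_add (j : Int) (r : List Int) :
    pvLastD ((j :: r).map (1 + ·)) = 1 + pvLastD (j :: r) := by
  unfold pvLastD
  rw [List.getLast?_map]
  rw [List.getLast?_eq_some_getLast (l := j :: r) (by simp)]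
  simp

theorem pvTake_eq_rtrim (ws : List String) (i : Int) (r : List Int)
    (h : pvUps ws 0 = i :: r) :
    ws.take ((pvLastD (i :: r)).toNat + 1) = pvRtrim ws := by
  induction ws generalizing i r with
  | nil => simp [pvUps, PySem.List.enumerate] at h
  | cons w ws ih =>
    rw [pvUps_cons, pvUps_shift ws (0+1)] at h
    rcases h2 : pvUps ws 0 with _ | ⟨j, r'⟩
    · rw [h2] at h
      by_cases hw : pvHeadUp w = true
      · simp [hw] at h
        obtain ⟨hi, hr⟩ := h
        subst hi; subst hr
        have hany : ws.any pvHeadUp = false := (pvUps_nil_iff ws 0).mp h2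
        rw [pvRtrim_cons]
        simp [pvLastD, hany, hw]
      · simp [hw] at h
    · rw [h2] at h
      have hL : pvLastD (j :: r') ∈ j :: r' := pvLastD_mem j r'
      have hL0 : 0 ≤ pvLastD (j :: r') := pvUps_nonneg ws 0 _ (by rw [h2]; exact hL)
      have hany : ws.any pvHeadUp = true := by
        by_contra hc
        simp only [Bool.not_eq_true] at hc
        rw [(pvUps_nil_iff ws 0).mpr hc] at h2; simp at h2
      have hlast : pvLastD (i :: r) = 1 + pvLastD (j :: r') := by
        by_cases hw : pvHeadUp w = true
        · simp only [hw, if_true] at h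
          have hi : i = 0 := by
            have := h; simp at this; omega
          have hr : r = (1 + j) :: r'.map (1 + ·) := by
            simp at h; exact h.2.symm
          rw [hi, hr, pvLastD_cons_cons]
          have hm : (1 + j) :: r'.map (1 + ·) = (j :: r').map (1 + ·) := by simp
          rw [hm, pvLastD_map_add]
        · simp only [hw, if_false, Bool.false_eq_true] at h
          rw [← h, zero_add]
          exact pvLastD_map_add j r'
      have IH := ih j r' h2
      rw [hlast]
      have hn : (1 + pvLastD (j :: r')).toNat + 1 = ((pvLastD (j :: r')).toNat + 1) + 1 := by omega
      rw [hn, List.take_succ_cons, IH, pvRtrim_cons, if_pos hany]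

theorem pvLtrim_nil (ws : List String) (h : ws.any pvHeadUp = false) : pvLtrim ws = [] := by
  unfold pvLtrim
  rw [List.dropWhile_eq_nil_iff]
  intro x hx
  have hf : pvHeadUp x = false := by
    by_contra hc
    simp only [Bool.not_eq_false] at hc
    rw [List.any_eq_true.mpr ⟨x, hx, hc⟩] at h
    exact absurd h (by simp)
  simp [hf]

theorem pvMain (ws : List String) (i : Int) (r : List Int)
    (h : pvUps ws 0 = i :: r) :
    PySem.List.slice ws (some i) (some (pvLastD (i :: r) + 1)) = pvRtrim (pvLtrim ws) := by
  induction ws generalizing i r with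
  | nil => simp [pvUps, PySem.List.enumerate] at h
  | cons w ws ih =>
    have hL : pvLastD (i :: r) ∈ i :: r := pvLastD_mem i r
    have hL0 : 0 ≤ pvLastD (i :: r) := pvUps_nonneg (w :: ws) 0 _ (by rw [h]; exact hL)
    have hi0 : 0 ≤ i := pvUps_nonneg (w :: ws) 0 i (by rw [h]; simp)
    by_cases hw : pvHeadUp w = true
    · have hi : i = 0 := by
        rw [pvUps_cons, if_pos hw] at h
        exact (List.cons_eq_cons.mp h).1.symm
      have hlt : pvLtrim (w :: ws) = w :: ws := by simp [pvLtrim, List.dropWhile, hw]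
      rw [hlt, ← pvTake_eq_rtrim (w :: ws) i r h]
      subst hi
      rw [PySem.List.slice_toNat (w :: ws) (by omega) (by omega)]
      simp only [Int.toNat_zero, List.drop_zero]
      congr 1
      omega
    · rw [pvUps_cons, if_neg (by simp [hw]), pvUps_shift ws (0+1)] at h
      rcases h2 : pvUps ws 0 with _ | ⟨j, r'⟩
      · rw [h2] at h; simp at h
      · rw [h2] at h
        have hj0 : 0 ≤ j := pvUps_nonneg ws 0 j (by rw [h2]; simp)
        have hL' : 0 ≤ pvLastD (j :: r') :=
          pvUps_nonneg ws 0 _ (by rw [h2]; exact pvLastD_mem j r')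
        have hi : i = 1 + j := by
          simp at h; omega
        have hlast : pvLastD (i :: r) = 1 + pvLastD (j :: r') := by
          have hm : i :: r = (j :: r').map (1 + ·) := h.symm
          rw [hm, pvLastD_map_add]
        have hlt : pvLtrim (w :: ws) = pvLtrim ws := by
          simp [pvLtrim, List.dropWhile, hw]
        rw [hlt, ← ih j r' h2]
        rw [PySem.List.slice_toNat (w :: ws) hi0 (by omega),
            PySem.List.slice_toNat ws hj0 (by omega)]
        have hd : i.toNat = j.toNat + 1 := by omega
        rw [hd, List.drop_succ_cons]
        congr 1
        omega

theorem pvUpIndices_eq (ws : List String) : pvUpIndices ws = pvUps ws 0 := rfl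

theorem pvGetLast_eq_lastD (i : Int) (r : List Int) (h : i :: r ≠ []) :
    (i :: r).getLast h = pvLastD (i :: r) := by
  unfold pvLastD
  rw [List.getLast?_eq_some_getLast (l := i :: r) h]
  rfl

-- ===== VERDICT (by name: the statement is the Claim_ definition above) =====
theorem extractUppercased_spec : Claim_equal_extractUppercased := by
  intro sentence _
  unfold Spec_extractUppercased extractUppercased extractUppercased_alt
  simp only [pvUpIndices_eq]
  rcases h : pvUps (PySem.Str.split₀ sentence) 0 with _ | ⟨i, r⟩
  · have hany : (PySem.Str.split₀ sentence).any pvHeadUp = false :=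
      (pvUps_nil_iff _ 0).mp h
    rw [pvFoldA, pvLtrim_nil _ hany]
    rfl
  · rw [pvFoldA, ← pvMain _ i r h]
    show PySem.Str.join " " _ =
      PySem.Str.join " " (PySem.List.slice (PySem.Str.split₀ sentence) (some i)
        (some ((i :: r).getLast (List.cons_ne_nil i r) + 1)))
    rw [pvGetLast_eq_lastD]
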